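-- pv_equiv track=rewrite | github.com/981377660LMT/algorithm-study | 9_排序和搜索/二分/经典题/Paying Workers With Coins.py | solve
-- ===== SOURCE A (Python) =====
-- from bisect import bisect_left
--
-- MOD = int(1e9 + 7)
--
-- def solve(coins, salaries):
--     """返回发工资的方案数"""
--     coins = sorted(coins)
--     salaries = sorted(salaries, reverse=True)
--
--     res = 1
--     for i, salary in enumerate(salaries):
--         inValid = bisect_left(coins, salary)
--         valid = len(coins) - inValid
--         res *= valid - i
--         res %= MOD
--
--     return res
-- ===== SOURCE B (Python) =====
-- MOD = int(1e9 + 7)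
--
-- def solve(coins, salaries):
--     """返回发工资的方案数"""
--     coins = sorted(coins)
--     salaries = sorted(salaries, reverse=True)
--
--     res = 1
--     p = len(coins)  # single descending pointer replaces the per-salary binary search
--     for i, salary in enumerate(salaries):
--         while p > 0 and coins[p - 1] >= salary:
--             p -= 1
--         valid = len(coins) - p
--         res = res * (valid - i) % MOD
--     return res
-- ===== Notes on version B (the rewrite author's own statement) =====
-- stated objective: alternative
-- what changed: The per-salary binary search (bisect_left) is replaced by a single monotone pointer swept once across the sorted coins while salaries are processed in descending order.
import Mathlib
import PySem

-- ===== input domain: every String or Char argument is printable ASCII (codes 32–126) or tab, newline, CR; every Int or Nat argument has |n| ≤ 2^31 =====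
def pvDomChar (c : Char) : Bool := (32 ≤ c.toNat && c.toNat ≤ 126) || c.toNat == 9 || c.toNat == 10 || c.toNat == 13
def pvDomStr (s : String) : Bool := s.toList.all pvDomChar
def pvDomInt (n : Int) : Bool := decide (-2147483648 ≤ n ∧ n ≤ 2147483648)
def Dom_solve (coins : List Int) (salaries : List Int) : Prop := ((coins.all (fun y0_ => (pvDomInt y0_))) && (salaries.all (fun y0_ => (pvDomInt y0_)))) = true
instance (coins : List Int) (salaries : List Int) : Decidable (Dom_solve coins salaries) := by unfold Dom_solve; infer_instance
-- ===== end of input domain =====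

-- B replaces A's per-salary bisect_left with one monotone pointer swept across the sorted
-- coins while salaries descend (same cost class; a genuinely different traversal).

def pyMOD : Int := 1000000007

-- ===== PORT A =====
def solve (coins : List Int) (salaries : List Int) : Int :=
  let cs := PySem.List.sorted coins (fun x => x)
  let ss := PySem.List.sorted salaries (fun x => x) true
  (PySem.List.enumerate ss).foldl
    (fun res q =>
      let inValid : Int := (PySem.List.bisectLeft cs q.2 : Int)
      let valid : Int := (cs.length : Int) - inValid
      PySem.Int.mod (res * (valid - q.1)) pyMOD) 1

-- ===== PORT B =====
-- the `while p > 0 and coins[p-1] >= salary: p -= 1` loop (the `none` branch is an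
-- unreachable totality guard: the pointer never exceeds the list length)
def movePtr (cs : List Int) (salary : Int) : Nat → Nat
  | 0 => 0
  | p + 1 =>
    match cs[p]? with
    | some c => if salary ≤ c then movePtr cs salary p else p + 1
    | none => p + 1

def solve_alt (coins : List Int) (salaries : List Int) : Int :=
  let cs := PySem.List.sorted coins (fun x => x)
  let ss := PySem.List.sorted salaries (fun x => x) true
  ((PySem.List.enumerate ss).foldl
    (fun (st : Nat × Int) q =>
      let p := movePtr cs q.2 st.1
      let valid : Int := (cs.length : Int) - (p : Int)
      (p, PySem.Int.mod (st.2 * (valid - q.1)) pyMOD)) (cs.length, 1)).2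

-- ===== PRECONDITION & SPEC =====
def Spec_solve (coins : List Int) (salaries : List Int) (out : Int) : Prop := out = solve_alt coins salaries
instance (coins : List Int) (salaries : List Int) (out : Int) : Decidable (Spec_solve coins salaries out) := by unfold Spec_solve; infer_instance

-- ===== CLAIM (what is proved, stated in full; the proofs are below) =====
def Claim_equal_solve : Prop := ∀ (coins : List Int) (salaries : List Int), Dom_solve coins salaries → Spec_solve coins salaries (solve coins salaries)

-- ===== LEMMAS AND PROOFS =====

theorem bisect_mono (cs : List Int) (hcs : List.Pairwise (· ≤ ·) cs)
    {s' s : Int} (h : s' ≤ s) :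
    PySem.List.bisectLeft cs s' ≤ PySem.List.bisectLeft cs s := by
  by_contra hc
  rw [not_le] at hc
  obtain ⟨hlen', hlt', _⟩ := PySem.List.bisectLeft_spec cs s' hcs
  obtain ⟨_, _, hge⟩ := PySem.List.bisectLeft_spec cs s hcs
  have hb : PySem.List.bisectLeft cs s < cs.length := lt_of_lt_of_le hc hlen'
  have h1 : cs[PySem.List.bisectLeft cs s] < s' := hlt' _ hb hc
  have h2 : s ≤ cs[PySem.List.bisectLeft cs s] := hge _ hb le_rfl
  omega

theorem movePtr_eq (cs : List Int) (hcs : List.Pairwise (· ≤ ·) cs) (s : Int) (p : Nat)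
    (hb : PySem.List.bisectLeft cs s ≤ p) (hp : p ≤ cs.length) :
    movePtr cs s p = PySem.List.bisectLeft cs s := by
  induction p with
  | zero =>
    have : PySem.List.bisectLeft cs s = 0 := Nat.le_zero.mp hb
    simp [movePtr, this]
  | succ p ih =>
    have hlt : p < cs.length := hp
    obtain ⟨_, hfst, hsnd⟩ := PySem.List.bisectLeft_spec cs s hcs
    unfold movePtr
    rw [List.getElem?_eq_getElem hlt]
    by_cases h : PySem.List.bisectLeft cs s ≤ p
    · have hle : s ≤ cs[p] := hsnd p hlt h
      simp only [hle, if_pos]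
      exact ih h (le_of_lt hlt)
    · have hbe : PySem.List.bisectLeft cs s = p + 1 := by omega
      have hx : cs[p] < s := hfst p hlt (by omega)
      simp only [not_le.mpr hx, if_false, hbe]

theorem fold_eq (cs : List Int) (hcs : List.Pairwise (· ≤ ·) cs)
    (l : List (Int × Int)) (p : Nat) (res : Int)
    (hl : List.Pairwise (fun a b => b.2 ≤ a.2) l)
    (hp : ∀ q ∈ l, PySem.List.bisectLeft cs q.2 ≤ p)
    (hpl : p ≤ cs.length) :
    (l.foldl
      (fun (st : Nat × Int) q =>
        let p := movePtr cs q.2 st.1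
        let valid : Int := (cs.length : Int) - (p : Int)
        (p, PySem.Int.mod (st.2 * (valid - q.1)) pyMOD)) (p, res)).2 =
    l.foldl
      (fun res q =>
        let inValid : Int := (PySem.List.bisectLeft cs q.2 : Int)
        let valid : Int := (cs.length : Int) - inValid
        PySem.Int.mod (res * (valid - q.1)) pyMOD) res := by
  induction l generalizing p res with
  | nil => rfl
  | cons q t ih =>
    simp only [List.foldl_cons]
    have hmv : movePtr cs q.2 p = PySem.List.bisectLeft cs q.2 :=
      movePtr_eq cs hcs q.2 p (hp q (List.mem_cons_self)) hpl
    have hblen : PySem.List.bisectLeft cs q.2 ≤ cs.length :=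
      (PySem.List.bisectLeft_spec cs q.2 hcs).1
    rw [hmv]
    exact ih (PySem.List.bisectLeft cs q.2) _ hl.of_cons
      (fun r hr => bisect_mono cs hcs (List.rel_of_pairwise_cons hl hr))
      hblen

-- ===== VERDICT (by name: the statement is the Claim_ definition above) =====
theorem solve_spec : Claim_equal_solve := by
  intro coins salaries _
  unfold Spec_solve solve solve_alt
  have hcs : List.Pairwise (· ≤ ·) (PySem.List.sorted coins (fun x => x)) :=
    PySem.List.sorted_pairwise coins (fun x => x)
  have h1 : List.Pairwise (fun a b => b ≤ a)
      (List.map (fun x => x.2) (PySem.List.enumerate (PySem.List.sorted salaries (fun x => x) true) 0)) := by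
    rw [PySem.List.map_snd_enumerate]
    exact PySem.List.sorted_pairwise_rev salaries (fun x => x)
  have h2 := List.pairwise_map.mp h1
  exact (fold_eq _ hcs _ _ 1 h2
    (fun q _ => (PySem.List.bisectLeft_spec _ q.2 hcs).1) le_rfl).symm
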